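-- pv_equiv track=rewrite | github.com/Ltotheois/Pyckett | pyckett/pyckett.py | parse_param_id
-- ===== SOURCE A (Python) =====
-- def get_par_digits(vib_digits):
-- 	"""Return the digits for the parameter coding."""
-- 	return({
-- 		'v1': vib_digits,
-- 		'v2': vib_digits,
-- 		'NSQ': 1,
-- 		'KSQ': 1,
-- 		'TYP': 2,
-- 		'NS': 1,
-- 		'I1': 1,
-- 		'I2': 1,
-- 		'FF': 2,
-- 		'EX': 1,
-- 	})
--
-- def parse_param_id(param_id, vib_digits):
-- 	"""Parse parameter id to parameter dictionary."""
-- 	param_id = abs(param_id)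
-- 	result = {}
-- 	for label, digits in get_par_digits(vib_digits).items():
-- 		if digits == 0:
-- 			continue
-- 		param_id, result[label] = divmod(param_id, 10**digits)
-- 	return(result)
-- ===== SOURCE B (Python) =====
-- def get_par_digits(vib_digits):
-- 	"""Return the digits for the parameter coding."""
-- 	return({
-- 		'v1': vib_digits,
-- 		'v2': vib_digits,
-- 		'NSQ': 1,
-- 		'KSQ': 1,
-- 		'TYP': 2,
-- 		'NS': 1,
-- 		'I1': 1,
-- 		'I2': 1,
-- 		'FF': 2,
-- 		'EX': 1,
-- 	})
--
-- def parse_param_id(param_id, vib_digits):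
-- 	"""Parse parameter id to parameter dictionary."""
-- 	s = list(str(abs(param_id)))
-- 	result = {}
-- 	for label, digits in get_par_digits(vib_digits).items():
-- 		if digits == 0:
-- 			continue
-- 		cut = max(len(s) - digits, 0)
-- 		chunk, s = s[cut:], s[:cut]
-- 		value = 0
-- 		for c in chunk:
-- 			value = value * 10 + (ord(c) - 48)
-- 		result[label] = value
-- 	return result
-- ===== Notes on version B (the rewrite author's own statement) =====
-- stated objective: faster
-- what changed: B converts abs(param_id) to its decimal character string once and peels each field off the right end by slicing, re-evaluating the slice with a Horner loop over its characters, instead of A's chain of big-integer divmods by 10**digits on a shrinking quotient; B never materialises the huge constant 10**vib_digits, so its cost is independent of vib_digits.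
import Mathlib
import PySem

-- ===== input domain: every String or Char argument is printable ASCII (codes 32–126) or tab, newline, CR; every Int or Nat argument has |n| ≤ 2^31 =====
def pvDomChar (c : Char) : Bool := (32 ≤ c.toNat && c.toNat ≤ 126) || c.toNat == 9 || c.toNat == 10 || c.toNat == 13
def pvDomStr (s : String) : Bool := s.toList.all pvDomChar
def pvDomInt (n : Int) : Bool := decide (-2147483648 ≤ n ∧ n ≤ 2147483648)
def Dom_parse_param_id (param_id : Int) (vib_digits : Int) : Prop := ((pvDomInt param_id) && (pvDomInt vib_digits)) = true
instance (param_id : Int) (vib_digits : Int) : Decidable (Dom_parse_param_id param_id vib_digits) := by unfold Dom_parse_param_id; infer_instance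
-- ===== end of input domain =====

-- B slices each field off the right end of the decimal character string of |param_id| and
-- re-evaluates it by a per-character Horner loop, instead of A's chain of divmods by
-- 10**digits on a shrinking quotient; B never forms 10**vib_digits (objective: faster,
-- measured).

-- ===== PORT A =====
-- get_par_digits: the ordered label/digits table (dict literal with distinct keys = association list)
def get_par_digits (vib_digits : Int) : List (String × Int) :=
  [("v1", vib_digits), ("v2", vib_digits), ("NSQ", 1), ("KSQ", 1), ("TYP", 2),
   ("NS", 1), ("I1", 1), ("I2", 1), ("FF", 2), ("EX", 1)]

-- 10**digits: exact for digits ≥ 0, which Pre_ guarantees (Python yields a float for negative digits)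
def pow10 (d : Int) : Int := 10 ^ d.toNat

def parse_param_id (param_id : Int) (vib_digits : Int) : List (String × Int) :=
  let p0 := |param_id|
  let st := (get_par_digits vib_digits).foldl
    (fun (st : Int × PySem.Dict String Int) ld =>
      if ld.2 == 0 then st
      else (PySem.Int.floordiv st.1 (pow10 ld.2),
            st.2.insert ld.1 (PySem.Int.mod st.1 (pow10 ld.2))))
    (p0, PySem.Dict.empty)
  st.2.items

-- ===== PORT B =====
def parse_param_id_alt (param_id : Int) (vib_digits : Int) : List (String × Int) :=
  let s0 := (PySem.Int.toStr |param_id|).toList    -- list(str(abs(param_id)))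
  let st := (get_par_digits vib_digits).foldl
    (fun (st : List Char × PySem.Dict String Int) ld =>
      if ld.2 == 0 then st
      else
        let cut : Int := max ((st.1.length : Int) - ld.2) 0
        let chunk := PySem.List.slice st.1 (some cut) none     -- s[cut:]
        let rest := PySem.List.slice st.1 none (some cut)      -- s[:cut]
        let value := chunk.foldl (fun v c => v * 10 + ((c.toNat : Int) - 48)) 0
        (rest, st.2.insert ld.1 value))
    (s0, PySem.Dict.empty)
  st.2.items

-- ===== PRECONDITION & SPEC =====
-- Pre_ excludes vib_digits < 0: there Python's 10**vib_digits is a float, so A returns a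
-- dict of floats — not values of the declared int type.
def Pre_parse_param_id (param_id : Int) (vib_digits : Int) : Prop := 0 ≤ vib_digits
instance (param_id : Int) (vib_digits : Int) : Decidable (Pre_parse_param_id param_id vib_digits) := by unfold Pre_parse_param_id; infer_instance

def pvWitness_parse_param_id : Int × Int := (1234567, 2)

def Spec_parse_param_id (param_id : Int) (vib_digits : Int) (out : List (String × Int)) : Prop := out = parse_param_id_alt param_id vib_digits
instance (param_id : Int) (vib_digits : Int) (out : List (String × Int)) : Decidable (Spec_parse_param_id param_id vib_digits out) := by unfold Spec_parse_param_id; infer_instance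

-- ===== CLAIM (what is proved, stated in full; the proofs are below) =====
def Claim_equal_parse_param_id : Prop := ∀ (param_id : Int) (vib_digits : Int), Dom_parse_param_id param_id vib_digits → Pre_parse_param_id param_id vib_digits → Spec_parse_param_id param_id vib_digits (parse_param_id param_id vib_digits)

-- ===== LEMMAS AND PROOFS =====

-- Nat value of a digit string, Horner style (proof-side mirror of B's value loop)
def hornerNat (cs : List Char) : Nat := cs.foldl (fun v c => v * 10 + (c.toNat - 48)) 0

theorem hornerNat_foldl (cs : List Char) : ∀ v : Nat,
    cs.foldl (fun v c => v * 10 + (c.toNat - 48)) v = v * 10 ^ cs.length + hornerNat cs := by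
  induction cs with
  | nil => intro v; simp [hornerNat]
  | cons c cs ih =>
    intro v
    simp only [List.foldl_cons, hornerNat, List.length_cons]
    rw [ih (v * 10 + (c.toNat - 48)), ih (0 * 10 + (c.toNat - 48))]
    ring_nf

theorem horner_int_eq (cs : List Char) (h : ∀ c ∈ cs, 48 ≤ c.toNat) :
    cs.foldl (fun v c => v * 10 + ((c.toNat : Int) - 48)) 0 = (hornerNat cs : Nat) := by
  suffices H : ∀ v : Nat, cs.foldl (fun v c => v * 10 + ((c.toNat : Int) - 48)) (v : Int)
      = ((cs.foldl (fun v c => v * 10 + (c.toNat - 48)) v : Nat) : Int) by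
    simpa [hornerNat] using H 0
  induction cs with
  | nil => intro v; rfl
  | cons c cs ih =>
    intro v
    have hc : 48 ≤ c.toNat := h c (by simp)
    simp only [List.foldl_cons]
    have : ((v : Int) * 10 + ((c.toNat : Int) - 48)) = ((v * 10 + (c.toNat - 48) : Nat) : Int) := by
      push_cast [hc]; ring
    rw [this]
    exact ih (fun c hm => h c (by simp [hm])) _

theorem hornerNat_lt (cs : List Char) (h : ∀ c ∈ cs, c.toNat ≤ 57) :
    hornerNat cs < 10 ^ cs.length := by
  induction cs with
  | nil => simp [hornerNat]
  | cons c cs ih =>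
    have h1 : hornerNat (c :: cs) = (c.toNat - 48) * 10 ^ cs.length + hornerNat cs := by
      simp only [hornerNat, List.foldl_cons]
      rw [hornerNat_foldl]
      show (0 * 10 + (c.toNat - 48)) * 10 ^ cs.length + hornerNat cs = _
      ring_nf
      rfl
    have h2 : hornerNat cs < 10 ^ cs.length := ih (fun c hm => h c (by simp [hm]))
    have h3 : c.toNat - 48 ≤ 9 := by have := h c (by simp); omega
    have h4 : (c.toNat - 48) * 10 ^ cs.length ≤ 9 * 10 ^ cs.length :=
      Nat.mul_le_mul_right _ h3
    simp only [List.length_cons]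
    calc hornerNat (c :: cs) ≤ 9 * 10 ^ cs.length + hornerNat cs := by omega
      _ < 10 ^ (cs.length + 1) := by rw [pow_succ]; omega


theorem digitChar_toNat (n : Nat) (h : n < 10) : (Nat.digitChar n).toNat = 48 + n := by
  interval_cases n <;> decide

theorem toDigits_horner (n : Nat) :
    hornerNat (Nat.toDigits 10 n) = n ∧
    ∀ c ∈ Nat.toDigits 10 n, 48 ≤ c.toNat ∧ c.toNat ≤ 57 := by
  induction n using Nat.strong_induction_on with
  | _ n ih =>
    rw [Nat.toDigits_eq_if (by norm_num)]
    by_cases h : n < 10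
    · simp only [if_pos h]
      refine ⟨?_, ?_⟩
      · simp [hornerNat, digitChar_toNat n h]
      · intro c hc
        simp only [List.mem_singleton] at hc
        subst hc
        rw [digitChar_toNat n h]; omega
    · simp only [if_neg h]
      have hdiv : n / 10 < n := Nat.div_lt_self (by omega) (by norm_num)
      obtain ⟨ihv, ihd⟩ := ih (n / 10) hdiv
      constructor
      · simp only [hornerNat, List.foldl_append, List.foldl_cons, List.foldl_nil]
        rw [show (List.foldl (fun v c => v * 10 + (c.toNat - 48)) 0 (Nat.toDigits 10 (n / 10))) = hornerNat (Nat.toDigits 10 (n / 10)) from rfl, ihv]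
        rw [digitChar_toNat (n % 10) (Nat.mod_lt _ (by norm_num))]
        omega
      · intro c hc
        rcases List.mem_append.mp hc with hc | hc
        · exact ihd c hc
        · simp only [List.mem_singleton] at hc
          subst hc
          rw [digitChar_toNat (n % 10) (Nat.mod_lt _ (by norm_num))]
          omega

-- splitting a digit string at (length - d) realises divmod by 10^d
theorem horner_split (cs : List Char) (d : Nat) (hd : 0 < d)
    (hdig : ∀ c ∈ cs, 48 ≤ c.toNat ∧ c.toNat ≤ 57) :
    hornerNat (cs.take (cs.length - d)) = hornerNat cs / 10 ^ d ∧
    hornerNat (cs.drop (cs.length - d)) = hornerNat cs % 10 ^ d := by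
  by_cases hle : cs.length ≤ d
  · have hlt : hornerNat cs < 10 ^ d :=
      lt_of_lt_of_le (hornerNat_lt cs (fun c hc => (hdig c hc).2))
        (Nat.pow_le_pow_right (by norm_num) hle)
    have h0 : cs.length - d = 0 := by omega
    rw [h0]
    simp only [List.take_zero, List.drop_zero]
    exact ⟨by rw [Nat.div_eq_of_lt hlt]; rfl, by rw [Nat.mod_eq_of_lt hlt]⟩
  · push_neg at hle
    set cut := cs.length - d with hcut
    have hsplit : cs = cs.take cut ++ cs.drop cut := (List.take_append_drop cut cs).symm
    have hlen : (cs.drop cut).length = d := by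
      rw [List.length_drop]; omega
    have hval : hornerNat cs = hornerNat (cs.take cut) * 10 ^ d + hornerNat (cs.drop cut) := by
      conv_lhs => rw [hsplit]
      simp only [hornerNat, List.foldl_append]
      rw [hornerNat_foldl (cs.drop cut), hlen]
      rfl
    have hrlt : hornerNat (cs.drop cut) < 10 ^ d := by
      have := hornerNat_lt (cs.drop cut)
        (fun c hc => (hdig c (List.mem_of_mem_drop hc)).2)
      rwa [hlen] at this
    constructor
    · rw [hval, mul_comm, Nat.mul_add_div (by positivity), Nat.div_eq_of_lt hrlt]
      omega
    · rw [hval, Nat.mul_add_mod', Nat.mod_eq_of_lt hrlt]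

-- Loop invariant: A's quotient is the value of B's remaining digit string; the dicts coincide.
theorem fold_eq (L : List (String × Int)) (hL : ∀ ld ∈ L, 0 ≤ ld.2) :
    ∀ (cs : List Char) (acc : PySem.Dict String Int),
    (∀ c ∈ cs, 48 ≤ c.toNat ∧ c.toNat ≤ 57) →
    (L.foldl
      (fun (st : Int × PySem.Dict String Int) ld =>
        if ld.2 == 0 then st
        else (PySem.Int.floordiv st.1 (pow10 ld.2),
              st.2.insert ld.1 (PySem.Int.mod st.1 (pow10 ld.2))))
      ((hornerNat cs : Int), acc)).2
    =
    (L.foldl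
      (fun (st : List Char × PySem.Dict String Int) ld =>
        if ld.2 == 0 then st
        else
          let cut : Int := max ((st.1.length : Int) - ld.2) 0
          let chunk := PySem.List.slice st.1 (some cut) none
          let rest := PySem.List.slice st.1 none (some cut)
          let value := chunk.foldl (fun v c => v * 10 + ((c.toNat : Int) - 48)) 0
          (rest, st.2.insert ld.1 value))
      (cs, acc)).2 := by
  induction L with
  | nil => intro cs acc _; rfl
  | cons hd tl ih =>
    intro cs acc hdig
    have hnn : 0 ≤ hd.2 := hL hd (by simp)
    have hL' : ∀ ld ∈ tl, 0 ≤ ld.2 := fun ld hm => hL ld (by simp [hm])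
    by_cases h0 : hd.2 == 0
    · simp only [List.foldl_cons, h0, if_pos]
      exact ih hL' cs acc hdig
    · simp only [List.foldl_cons, h0, if_neg, Bool.false_eq_true, not_false_iff]
      have hdpos : 0 < hd.2 := lt_of_le_of_ne hnn (fun h => h0 (by simp [← h]))
      set d : Nat := hd.2.toNat with hdN
      have hd1 : 0 < d := by omega
      -- the slice bound: cut = max(len - digits, 0), and cut.toNat = len - d (Nat subtraction)
      have hcut_nn : (0 : Int) ≤ max ((cs.length : Int) - hd.2) 0 := le_max_right _ _
      have hcutN : (max ((cs.length : Int) - hd.2) 0).toNat = cs.length - d := by omega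
      rw [PySem.List.slice_from _ hcut_nn, PySem.List.slice_to _ hcut_nn, hcutN]
      -- B's inserted value is the Horner value of the dropped chunk
      have hchunk_dig : ∀ c ∈ cs.drop (cs.length - d), 48 ≤ c.toNat ∧ c.toNat ≤ 57 :=
        fun c hc => hdig c (List.mem_of_mem_drop hc)
      rw [horner_int_eq _ (fun c hc => (hchunk_dig c hc).1)]
      obtain ⟨hq, hr⟩ := horner_split cs d hd1 hdig
      rw [hr]
      -- A's divmod in Nat form
      have hpow : pow10 hd.2 = ((10 ^ d : Nat) : Int) := by
        simp [pow10, hdN]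
      have hmod : PySem.Int.mod ((hornerNat cs : Nat) : Int) (pow10 hd.2)
          = ((hornerNat cs % 10 ^ d : Nat) : Int) := by
        rw [hpow]; exact PySem.Int.mod_natCast _ _
      have hdivA : PySem.Int.floordiv ((hornerNat cs : Nat) : Int) (pow10 hd.2)
          = ((hornerNat cs / 10 ^ d : Nat) : Int) := by
        rw [hpow]; exact PySem.Int.floordiv_natCast _ _
      rw [hmod, hdivA, ← hq]
      exact ih hL' (cs.take (cs.length - d)) _
        (fun c hc => hdig c (List.mem_of_mem_take hc))

theorem parse_param_id_spec : Claim_equal_parse_param_id := by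
  intro param_id vib_digits _ hpre
  unfold Spec_parse_param_id parse_param_id parse_param_id_alt
  -- the initial digit string is str(|param_id|) = Nat.toDigits 10 |param_id|.toNat
  have habs : ¬ (|param_id| < 0) := not_lt.mpr (abs_nonneg _)
  have hs0 : (PySem.Int.toStr |param_id|).toList = Nat.toDigits 10 |param_id|.toNat := by
    rw [PySem.Int.toList_toStr]
    simp [PySem.Int.toChars, habs]
  obtain ⟨hval, hdig⟩ := toDigits_horner |param_id|.toNat
  have hL : ∀ ld ∈ get_par_digits vib_digits, 0 ≤ ld.2 := by
    intro ld hm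
    unfold Pre_parse_param_id at hpre
    simp only [get_par_digits, List.mem_cons, List.not_mem_nil, or_false] at hm
    rcases hm with h|h|h|h|h|h|h|h|h|h <;> subst h <;> simp <;> omega
  have h := fold_eq (get_par_digits vib_digits) hL (Nat.toDigits 10 |param_id|.toNat)
    PySem.Dict.empty hdig
  rw [hval, Int.toNat_of_nonneg (abs_nonneg param_id)] at h
  rw [hs0]
  exact congrArg PySem.Dict.items h
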